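-- pv_equiv track=rewrite | github.com/AishwaryaJadhav9850/GeeksforGeeks | GeeksForGeek_Sum of Digit is Pallindrome or not.py | isDigitSumPalindrome
-- ===== SOURCE A (Python) =====
-- def isDigitSumPalindrome(N):
--     l=[]
--     n=N
--     sum=0
--     while(n//10!=0):
--         sum=sum+(n%10)
--         n=n//10
--     sum=sum+n
--     while(sum//10!=0):
--         l.append(sum%10)
--         sum=sum//10
--     l.append(sum)
--     i=0
--     j=len(l)-1
--     while(i<j):
--         if l[i]!=l[j]:
--             return 0
--         i+=1
--         j-=1
--     return 1
-- ===== SOURCE B (Python) =====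
-- def isDigitSumPalindrome(N):
--     s = 0
--     n = N
--     while n > 0:
--         s += n % 10
--         n //= 10
--     rev, t = 0, s
--     while t > 0:
--         rev = rev * 10 + t % 10
--         t //= 10
--     return 1 if rev == s else 0
-- ===== Notes on version B (the rewrite author's own statement) =====
-- stated objective: alternative
-- what changed: B reverses the digit sum arithmetically (rev = rev*10 + t%10) and compares rev == sum, instead of A's building a digit list and scanning it with two pointers; B also keeps no list at all.
import Mathlib
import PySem

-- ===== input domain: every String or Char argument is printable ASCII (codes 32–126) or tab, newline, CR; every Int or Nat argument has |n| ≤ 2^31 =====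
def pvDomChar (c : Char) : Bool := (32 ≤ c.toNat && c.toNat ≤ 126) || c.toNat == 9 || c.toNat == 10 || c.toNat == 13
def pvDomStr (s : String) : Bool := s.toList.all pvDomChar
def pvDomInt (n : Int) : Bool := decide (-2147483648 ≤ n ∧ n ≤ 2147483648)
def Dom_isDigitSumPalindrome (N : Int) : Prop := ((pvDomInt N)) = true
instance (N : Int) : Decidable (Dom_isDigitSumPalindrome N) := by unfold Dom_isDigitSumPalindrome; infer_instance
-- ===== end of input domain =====

-- B replaces A's digit-list + two-pointer palindrome test of the digit sum by an arithmetic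
-- reversal of the sum compared with the sum itself (objective: alternative, no list kept).

-- ===== PORT A =====
-- first while loop: while n//10 != 0: sum += n%10; n //= 10.
-- The fuel argument only makes the loop total in Lean; fuel = N.toNat + 1 is enough
-- whenever the Python loop terminates (0 ≤ N, see Pre_); for N < 0 the Python loop never ends.
def pvA_sumLoop : Nat → Int → Int → Int × Int
  | 0, n, sum => (n, sum)
  | f + 1, n, sum =>
    if PySem.Int.floordiv n 10 ≠ 0 then
      pvA_sumLoop f (PySem.Int.floordiv n 10) (sum + PySem.Int.mod n 10)
    else (n, sum)

-- second while loop: while sum//10 != 0: l.append(sum%10); sum //= 10  (fuel as above)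
def pvA_digitsLoop : Nat → Int → List Int → Int × List Int
  | 0, sum, l => (sum, l)
  | f + 1, sum, l =>
    if PySem.Int.floordiv sum 10 ≠ 0 then
      pvA_digitsLoop f (PySem.Int.floordiv sum 10) (l ++ [PySem.Int.mod sum 10])
    else (sum, l)

-- third while loop: the two-pointer scan.  l[i], l[j]: whenever this loop runs, 0 ≤ i < j ≤ len(l)-1,
-- so the indices are always in range and the .getD 0 default is never the value Python would raise on.
-- fuel = len(l) bounds the number of iterations (j - i shrinks by 2 per step from len(l) - 1)
def pvA_palLoop : Nat → List Int → Int → Int → Int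
  | 0, _, _, _ => 1
  | f + 1, l, i, j =>
    if i < j then
      if (PySem.List.pyGet? l i).getD 0 ≠ (PySem.List.pyGet? l j).getD 0 then 0
      else pvA_palLoop f l (i + 1) (j - 1)
    else 1

-- everything after A's first loop, as a function of the value of `sum` there
def pvA_tail (sum : Int) : Int :=
  let q := pvA_digitsLoop (sum.toNat + 1) sum []
  let l := q.2 ++ [q.1]
  pvA_palLoop l.length l 0 ((l.length : Int) - 1)

def isDigitSumPalindrome (N : Int) : Int :=
  let p := pvA_sumLoop (N.toNat + 1) N 0
  pvA_tail (p.2 + p.1)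

-- ===== PORT B =====
-- while n > 0: s += n % 10; n //= 10
def pvB_sumLoop (n s : Int) : Int :=
  if h : 0 < n then pvB_sumLoop (PySem.Int.floordiv n 10) (s + PySem.Int.mod n 10) else s
termination_by n.toNat
decreasing_by
  have h1 := PySem.Int.floordiv_eq_ediv_of_pos (a := n) (b := 10) (by omega)
  omega

-- while t > 0: rev = rev*10 + t % 10; t //= 10
-- (fuel t.toNat + 1 is enough: t drops by a factor of 10 each step)
def pvB_revLoop : Nat → Int → Int → Int
  | 0, rev, _ => rev
  | f + 1, rev, t =>
    if 0 < t then pvB_revLoop f (rev * 10 + PySem.Int.mod t 10) (PySem.Int.floordiv t 10) else rev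

-- everything after B's first loop, as a function of the value of `s` there
def pvB_tail (s : Int) : Int :=
  if pvB_revLoop (s.toNat + 1) 0 s = s then 1 else 0

def isDigitSumPalindrome_alt (N : Int) : Int :=
  pvB_tail (pvB_sumLoop N 0)

-- ===== PRECONDITION & SPEC =====
-- Pre_ excludes negative N, on which Python A's first loop never terminates, so A returns no value there.
def Pre_isDigitSumPalindrome (N : Int) : Prop := 0 ≤ N
instance (N : Int) : Decidable (Pre_isDigitSumPalindrome N) := by
  unfold Pre_isDigitSumPalindrome; infer_instance

def pvWitness_isDigitSumPalindrome : Int := (56)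

def Spec_isDigitSumPalindrome (N : Int) (out : Int) : Prop := out = isDigitSumPalindrome_alt N
instance (N : Int) (out : Int) : Decidable (Spec_isDigitSumPalindrome N out) := by
  unfold Spec_isDigitSumPalindrome; infer_instance

-- ===== CLAIM (what is proved, stated in full; the proofs are below) =====
def Claim_equal_isDigitSumPalindrome : Prop := ∀ (N : Int), Dom_isDigitSumPalindrome N → Pre_isDigitSumPalindrome N → Spec_isDigitSumPalindrome N (isDigitSumPalindrome N)

-- ===== LEMMAS AND PROOFS =====

-- reference digit sum on Nat
def pvDS (n : Nat) : Nat :=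
  if n = 0 then 0 else n % 10 + pvDS (n / 10)
termination_by n
decreasing_by exact Nat.div_lt_self (by omega) (by omega)

lemma pvDS_small {m : Nat} (h : m < 10) : pvDS m = m := by
  rw [pvDS]
  rcases Nat.eq_zero_or_pos m with h0 | h0
  · simp [h0]
  · rw [if_neg (by omega), Nat.div_eq_of_lt h, pvDS]
    simp [Nat.mod_eq_of_lt h]

lemma pvDS_le : ∀ (k m : Nat), m < 10 ^ k → pvDS m ≤ 9 * k := by
  intro k
  induction k with
  | zero => intro m h; interval_cases m; rw [pvDS]; simp
  | succ k ih =>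
    intro m h
    rw [pvDS]
    split
    · omega
    · have hd : m / 10 < 10 ^ k := by
        rw [Nat.div_lt_iff_lt_mul (by omega)]
        calc m < 10 ^ (k + 1) := h
          _ = 10 ^ k * 10 := by ring
      have := ih (m / 10) hd
      have := Nat.mod_lt m (show 0 < 10 by omega)
      omega

lemma pvA_sumLoop_eq : ∀ (fuel : Nat) (n s : Int), 0 ≤ n → n.toNat < fuel →
    (pvA_sumLoop fuel n s).2 + (pvA_sumLoop fuel n s).1 = s + (pvDS n.toNat : Int) := by
  intro fuel
  induction fuel with
  | zero => intro n s _ h; omega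
  | succ f ih =>
    intro n s hn hf
    rw [pvA_sumLoop]
    have hfd := PySem.Int.floordiv_eq_ediv_of_pos (a := n) (b := 10) (by omega)
    have hmd := PySem.Int.mod_eq_emod_of_pos (a := n) (b := 10) (by omega)
    by_cases hz : PySem.Int.floordiv n 10 ≠ 0
    · rw [if_pos hz]
      have h10 : 10 ≤ n := by omega
      have := ih (n / 10) (s + PySem.Int.mod n 10) (by omega) (by omega)
      rw [hfd, this, hmd]
      have hds : pvDS n.toNat = n.toNat % 10 + pvDS (n.toNat / 10) := by
        rw [pvDS]; rw [if_neg (by omega)]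
      have hcast : (n / 10).toNat = n.toNat / 10 := by omega
      rw [hcast, hds]
      push_cast
      omega
    · rw [if_neg hz]
      have h9 : n < 10 := by omega
      simp only
      rw [pvDS_small (by omega)]
      omega

lemma pvB_sumLoop_eq : ∀ (k : Nat) (n s : Int), n.toNat ≤ k → 0 ≤ n →
    pvB_sumLoop n s = s + (pvDS n.toNat : Int) := by
  intro k
  induction k with
  | zero =>
    intro n s hk hn
    rw [pvB_sumLoop, dif_neg (by omega)]
    have : n.toNat = 0 := by omega
    rw [this]; simp [pvDS]
  | succ k ih =>
    intro n s hk hn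
    rw [pvB_sumLoop]
    by_cases hp : 0 < n
    · rw [dif_pos hp]
      have hfd := PySem.Int.floordiv_eq_ediv_of_pos (a := n) (b := 10) (by omega)
      have hmd := PySem.Int.mod_eq_emod_of_pos (a := n) (b := 10) (by omega)
      have := ih (PySem.Int.floordiv n 10) (s + PySem.Int.mod n 10) (by omega) (by omega)
      rw [this]
      have hds : pvDS n.toNat = n.toNat % 10 + pvDS (n.toNat / 10) := by
        rw [pvDS]; rw [if_neg (by omega)]
      have hcast : (PySem.Int.floordiv n 10).toNat = n.toNat / 10 := by omega
      rw [hcast, hds, hmd]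
      push_cast
      omega
    · rw [dif_neg hp]
      have : n.toNat = 0 := by omega
      rw [this, pvDS]; simp

-- the two palindrome checks agree on every value the digit sum can take on Dom ∩ Pre_
lemma pv_tails_eq : ∀ m : Nat, m < 91 → pvA_tail (m : Int) = pvB_tail (m : Int) := by decide

theorem pv_equal (N : Int) (hD : Dom_isDigitSumPalindrome N) (hP : Pre_isDigitSumPalindrome N) :
    isDigitSumPalindrome N = isDigitSumPalindrome_alt N := by
  unfold Pre_isDigitSumPalindrome at hP
  have hDom : N ≤ 2147483648 := by
    unfold Dom_isDigitSumPalindrome pvDomInt at hD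
    simpa using (of_decide_eq_true hD).2
  have hA := pvA_sumLoop_eq (N.toNat + 1) N 0 hP (by omega)
  have hB := pvB_sumLoop_eq N.toNat N 0 le_rfl hP
  have hle : pvDS N.toNat ≤ 90 := by
    have : N.toNat < 10 ^ 10 := by omega
    have := pvDS_le 10 N.toNat this
    omega
  unfold isDigitSumPalindrome isDigitSumPalindrome_alt
  simp only
  rw [hA, hB]
  simp only [zero_add]
  exact pv_tails_eq (pvDS N.toNat) (by omega)

-- ===== VERDICT (by name: the statement is the Claim_ definition above) =====
theorem isDigitSumPalindrome_spec : Claim_equal_isDigitSumPalindrome := by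
  intro N hD hP
  unfold Spec_isDigitSumPalindrome
  exact pv_equal N hD hP
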